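-- pv_equiv track=rewrite | github.com/marunkumar891/Hybrid_Encoding | main.py | AssignNumericCode
-- ===== SOURCE A (Python) =====
-- def DecimalToBinary(binary,num):
--     if num > 1:
--         binary=DecimalToBinary(binary,num // 2)
--     binary.append(str(num % 2))
--     return binary
--
-- def AssignNumericCode(characters,bit_len):
--     char_dict={}
--     for i in range(len(characters)):
--         binary=[]
--         binary=DecimalToBinary(binary,i)
--         binary = "".join(binary)
--         while(len(binary)<bit_len):
--             binary = '0'+ binary
--         char_dict[characters[i]] = binary
--     return char_dict
-- ===== SOURCE B (Python) =====
-- def AssignNumericCode(characters, bit_len):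
--     return {ch: format(i, 'b').zfill(bit_len) for i, ch in enumerate(characters)}
-- ===== Notes on version B (the rewrite author's own statement) =====
-- stated objective: faster
-- what changed: Replaces the hand-rolled recursive decimal-to-binary helper and the one-char-at-a-time '0'+binary padding loop with the builtin format(i, 'b') plus str.zfill (which pads in one allocation) inside a single dict comprehension over enumerate(characters).
import Mathlib
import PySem

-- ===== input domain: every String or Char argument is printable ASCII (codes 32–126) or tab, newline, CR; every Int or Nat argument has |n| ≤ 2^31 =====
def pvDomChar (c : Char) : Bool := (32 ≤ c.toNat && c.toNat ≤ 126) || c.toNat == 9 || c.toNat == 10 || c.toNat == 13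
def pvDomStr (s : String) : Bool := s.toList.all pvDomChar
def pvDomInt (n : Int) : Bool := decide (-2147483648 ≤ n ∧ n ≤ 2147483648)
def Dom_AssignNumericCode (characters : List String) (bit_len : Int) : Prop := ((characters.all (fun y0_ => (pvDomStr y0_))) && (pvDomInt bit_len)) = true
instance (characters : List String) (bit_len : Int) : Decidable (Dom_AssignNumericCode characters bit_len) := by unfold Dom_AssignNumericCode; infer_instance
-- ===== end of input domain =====

-- B replaces A's hand-rolled recursive binary conversion and while-loop left-pad by the builtin
-- format(i, 'b') plus str.zfill inside a dict comprehension over enumerate (objective: idiomatic).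

-- ===== PORT A =====
-- recursive helper DecimalToBinary(binary, num)
def DecimalToBinary (binary : List String) (num : Int) : List String :=
  (if 1 < num then DecimalToBinary binary (PySem.Int.floordiv num 2) else binary)
    ++ [PySem.Int.toStr (PySem.Int.mod num 2)]
termination_by num.toNat
decreasing_by
  rename_i h
  rw [PySem.Int.floordiv_eq_ediv_of_pos (by omega)]
  omega

-- the `while(len(binary)<bit_len): binary = '0' + binary` loop, on the char list of the string
def padWhile (binary : List Char) (bit_len : Int) : List Char :=
  if (binary.length : Int) < bit_len then padWhile ('0' :: binary) bit_len else binary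
termination_by (bit_len - binary.length).toNat
decreasing_by
  rename_i h
  simp only [List.length_cons]
  omega

def AssignNumericCode (characters : List String) (bit_len : Int) : List (String × String) :=
  ((PySem.List.pyRange 0 (PySem.List.len characters)).foldl
    (fun char_dict i =>
      let binary := DecimalToBinary [] i
      let b := PySem.Str.join "" binary
      let b := String.ofList (padWhile b.toList bit_len)
      char_dict.insert (PySem.List.pyGetD characters i "") b)   -- characters[i]: i always in range
    (PySem.Dict.empty : PySem.Dict String String)).items

-- ===== PORT B =====
def AssignNumericCode_alt (characters : List String) (bit_len : Int) : List (String × String) :=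
  ((PySem.List.enumerate characters).foldl
    (fun d p => d.insert p.2 (PySem.Str.zfill (PySem.Int.toBin p.1) bit_len))
    (PySem.Dict.empty : PySem.Dict String String)).items

-- ===== PRECONDITION & SPEC =====
def Spec_AssignNumericCode (characters : List String) (bit_len : Int) (out : List (String × String)) : Prop := out = AssignNumericCode_alt characters bit_len
instance (characters : List String) (bit_len : Int) (out : List (String × String)) : Decidable (Spec_AssignNumericCode characters bit_len out) := by unfold Spec_AssignNumericCode; infer_instance

-- ===== CLAIM (what is proved, stated in full; the proofs are below) =====
def Claim_equal_AssignNumericCode : Prop := ∀ (characters : List String) (bit_len : Int), Dom_AssignNumericCode characters bit_len → Spec_AssignNumericCode characters bit_len (AssignNumericCode characters bit_len)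

-- ===== LEMMAS AND PROOFS =====

-- A's digit list for a nonnegative number is the base-2 digit characters, one per string
lemma dtb_digits (m : Nat) : ∀ n : Nat, n ≤ m →
    DecimalToBinary [] (n : Int) = (Nat.toDigits 2 n).map (fun c => String.ofList [c]) := by
  induction m with
  | zero =>
    intro n hn
    interval_cases n
    rw [DecimalToBinary, if_neg (by omega)]
    rw [Nat.toDigits_zero]
    decide
  | succ m ih =>
    intro n hn
    by_cases h2 : n < 2
    · interval_cases n
      · rw [DecimalToBinary, if_neg (by omega), Nat.toDigits_zero]; decide
      · rw [DecimalToBinary, if_neg (by omega),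
            Nat.toDigits_of_lt_base (by norm_num : 1 < 2)]
        decide
    · have h1 : (1 : Int) < (n : Int) := by exact_mod_cast (show 1 < n by omega)
      have hfd : PySem.Int.floordiv (n : Int) 2 = ((n / 2 : Nat) : Int) := by
        exact_mod_cast PySem.Int.floordiv_natCast n 2
      have hmd : PySem.Int.mod (n : Int) 2 = ((n % 2 : Nat) : Int) := by
        exact_mod_cast PySem.Int.mod_natCast n 2
      rw [DecimalToBinary, if_pos h1, hfd, hmd, ih (n / 2) (by omega)]
      conv_rhs => rw [Nat.toDigits_of_base_le (by norm_num) (show 2 ≤ n by omega), List.map_append]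
      congr 1
      rcases Nat.mod_two_eq_zero_or_one n with h | h <;> rw [h] <;> decide

-- every base-2 digit character is '0' or '1'
lemma toDigits2_mem (m : Nat) : ∀ n : Nat, n ≤ m → ∀ c ∈ Nat.toDigits 2 n, c = '0' ∨ c = '1' := by
  induction m with
  | zero =>
    intro n hn c hc
    interval_cases n
    rw [Nat.toDigits_zero] at hc
    simp at hc
    exact Or.inl hc
  | succ m ih =>
    intro n hn c hc
    by_cases h2 : n < 2
    · rw [Nat.toDigits_of_lt_base h2] at hc
      simp at hc
      interval_cases n
      · exact Or.inl (by rw [hc]; decide)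
      · exact Or.inr (by rw [hc]; decide)
    · rw [Nat.toDigits_of_base_le (by norm_num) (by omega)] at hc
      rcases List.mem_append.mp hc with h | h
      · exact ih (n / 2) (by omega) c h
      · simp at h
        rcases Nat.mod_two_eq_zero_or_one n with h' | h' <;> rw [h'] at h
        · exact Or.inl (by rw [h]; decide)
        · exact Or.inr (by rw [h]; decide)

-- the while-loop pads with '0' up to width bit_len
lemma padWhile_eq (k : Nat) : ∀ (cs : List Char) (w : Int), (w - cs.length).toNat ≤ k →
    padWhile cs w = List.replicate (w.toNat - cs.length) '0' ++ cs := by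
  induction k with
  | zero =>
    intro cs w hk
    have h1 : ¬ ((cs.length : Int) < w) := by omega
    have h2 : w.toNat - cs.length = 0 := by omega
    rw [padWhile, if_neg h1, h2]
    simp
  | succ k ih =>
    intro cs w hk
    by_cases h1 : (cs.length : Int) < w
    · rw [padWhile, if_pos h1, ih ('0' :: cs) w (by simp only [List.length_cons]; omega)]
      have h2 : w.toNat - cs.length = (w.toNat - ('0' :: cs).length) + 1 := by
        simp only [List.length_cons]; omega
      rw [h2, List.replicate_succ', List.append_assoc, List.singleton_append]
    · have h2 : w.toNat - cs.length = 0 := by omega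
      rw [padWhile, if_neg h1, h2]
      simp

-- zfill on a string that does not start with a sign is a plain left pad
lemma zfill_nosign (c : Char) (rest : List Char) (w : Int) (h0 : c ≠ '+') (h1 : c ≠ '-') :
    PySem.Chars.zfill (c :: rest) w = List.replicate (w.toNat - (c :: rest).length) '0' ++ (c :: rest) := by
  rw [PySem.Chars.zfill]
  split_ifs with h h'
  · have h2 : w.toNat - (c :: rest).length = 0 := by
      simp only [List.length_cons] at h ⊢; omega
    rw [h2]
    simp
  · exact absurd h' (by simp [h0, h1])
  · rfl

-- A's per-index string equals B's per-index string
lemma value_eq (n : Nat) (bl : Int) :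
    String.ofList (padWhile (PySem.Str.join "" (DecimalToBinary [] (n : Int))).toList bl)
      = PySem.Str.zfill (PySem.Int.toBin (n : Int)) bl := by
  have hjoin : (PySem.Str.join "" (DecimalToBinary [] (n : Int))).toList = Nat.toDigits 2 n := by
    rw [PySem.Str.toList_join, dtb_digits n n le_rfl, List.map_map]
    have hcomp : (String.toList ∘ fun c => String.ofList [c]) = fun c => [c] := by
      funext c; simp
    rw [hcomp]
    exact PySem.Chars.join_nil_singletons (Nat.toDigits 2 n)
  have hbin : (PySem.Int.toBin (n : Int)).toList = Nat.toDigits 2 n := by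
    rw [PySem.Int.toList_toBin, PySem.Int.toBinChars]
    have hneg : ¬ ((n : Int) < 0) := by omega
    simp [hneg]
  obtain ⟨c, rest, hcr⟩ : ∃ c rest, Nat.toDigits 2 n = c :: rest := by
    cases hd : Nat.toDigits 2 n with
    | nil => exact absurd (hd ▸ @Nat.length_toDigits_pos 2 n) (by simp)
    | cons c rest => exact ⟨c, rest, rfl⟩
  have hc01 : c = '0' ∨ c = '1' :=
    toDigits2_mem n n le_rfl c (by rw [hcr]; exact List.mem_cons_self)
  have hplus : c ≠ '+' := by rcases hc01 with h | h <;> subst h <;> decide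
  have hminus : c ≠ '-' := by rcases hc01 with h | h <;> subst h <;> decide
  rw [PySem.Str.zfill]
  apply congrArg String.ofList
  rw [hjoin, hbin, hcr, padWhile_eq (bl - ((c :: rest).length : Int)).toNat _ _ le_rfl,
      zfill_nosign c rest bl hplus hminus]

-- ===== VERDICT (by name: the statement is the Claim_ definition above) =====
theorem AssignNumericCode_spec : Claim_equal_AssignNumericCode := by
  intro characters bit_len _
  unfold Spec_AssignNumericCode AssignNumericCode AssignNumericCode_alt
  rw [PySem.List.enumerate_eq_map_pyRange characters "", List.foldl_map]
  apply congrArg PySem.Dict.items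
  apply PySem.List.foldl_congr_mem
  intro acc x hx
  obtain ⟨hx0, -⟩ := PySem.List.mem_pyRange_one.mp hx
  obtain ⟨n, rfl⟩ : ∃ k : Nat, x = (k : Int) := ⟨x.toNat, by omega⟩
  dsimp only
  rw [value_eq n bit_len]
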